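-- pv_equiv track=rewrite | github.com/AkshayTallikar/bioinsight | backend/services/clinvar.py | _resolve_significance
-- ===== SOURCE A (Python) =====
-- def _resolve_significance(sigs: list[str]) -> str:
--     """Return the most clinically relevant significance from a list."""
--     priority = [
--         "pathogenic",
--         "likely pathogenic",
--         "pathogenic/likely pathogenic",
--         "risk factor",
--         "uncertain significance",
--         "likely benign",
--         "benign",
--     ]
--     sigs_lower = [s.lower() for s in sigs]
--     for p in priority:
--         for s in sigs_lower:
--             if p in s:
--                 return p.title()
--     return sigs[0].title() if sigs else "Unknown"
-- ===== SOURCE B (Python) =====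
-- def _resolve_significance(sigs: list[str]) -> str:
--     """Return the most clinically relevant significance from a list."""
--     priority = [
--         "pathogenic",
--         "likely pathogenic",
--         "pathogenic/likely pathogenic",
--         "risk factor",
--         "uncertain significance",
--         "likely benign",
--         "benign",
--     ]
--     best = None
--     for s in sigs:
--         sl = s.lower()
--         for i, p in enumerate(priority):
--             if p in sl:
--                 if best is None or i < best:
--                     best = i
--                 break
--     if best is not None:
--         return priority[best].title()
--     return sigs[0].title() if sigs else "Unknown"
-- ===== Notes on version B (the rewrite author's own statement) =====
-- stated objective: alternative
-- what changed: Inverts the traversal: one pass over the sigs, each scanned once against the priority list for its first matching index, keeping a running global minimum index instead of A's priority-driven nested loop with early return.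
import Mathlib
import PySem

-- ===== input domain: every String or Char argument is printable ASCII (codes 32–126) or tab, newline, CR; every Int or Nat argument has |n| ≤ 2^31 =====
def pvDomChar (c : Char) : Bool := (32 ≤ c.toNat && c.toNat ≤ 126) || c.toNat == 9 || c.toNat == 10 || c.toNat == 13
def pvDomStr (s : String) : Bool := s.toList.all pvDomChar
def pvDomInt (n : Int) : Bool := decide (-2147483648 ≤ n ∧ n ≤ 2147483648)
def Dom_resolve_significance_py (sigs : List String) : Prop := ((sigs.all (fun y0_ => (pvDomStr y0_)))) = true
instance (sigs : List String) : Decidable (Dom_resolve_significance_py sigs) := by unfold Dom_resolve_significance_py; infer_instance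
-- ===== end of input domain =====

-- B inverts the traversal: one pass over sigs keeping a running minimum priority index,
-- instead of A's priority-driven nested loops with early return (objective: alternative).


-- shared by both ports: str.title(), ported by hand (exact on the ASCII domain,
-- where Python's 'cased' characters are exactly the letters)
def pvTitleChars : Bool → List Char → List Char
  | _, [] => []
  | prev, c :: rest =>
    if PySem.Chars.isalpha c then
      (if prev then PySem.Chars.lowerChar c else PySem.Chars.upperChar c) :: pvTitleChars true rest
    else
      c :: pvTitleChars false rest

def pvTitle (s : String) : String := String.ofList (pvTitleChars false s.toList)

-- the priority constant both Pythons define verbatim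
def pvPriority : List String :=
  ["pathogenic", "likely pathogenic", "pathogenic/likely pathogenic", "risk factor",
   "uncertain significance", "likely benign", "benign"]

-- ===== PORT A =====
-- A's nested loop: 'for p in priority: for s in sigs_lower: if p in s: return p.title()'
def pvAOuter : List String → List String → Option String
  | [], _ => none
  | p :: ps, sigs_lower =>
    if sigs_lower.any (fun s => PySem.Str.isIn p s) then some p
    else pvAOuter ps sigs_lower

def resolve_significance_py (sigs : List String) : String :=
  let sigs_lower := sigs.map PySem.Str.lower
  match pvAOuter pvPriority sigs_lower with
  | some p => pvTitle p
  | none => match sigs with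
            | [] => "Unknown"
            | s0 :: _ => pvTitle s0

-- ===== PORT B =====
-- B's inner scan: first priority index (from i) whose string is contained in sl
def pvFirstMatch : List String → String → Nat → Option Nat
  | [], _, _ => none
  | p :: ps, sl, i => if PySem.Str.isIn p sl then some i else pvFirstMatch ps sl (i + 1)

def resolve_significance_py_alt (sigs : List String) : String :=
  let best : Option Nat := sigs.foldl (fun best s =>
      match pvFirstMatch pvPriority (PySem.Str.lower s) 0 with
      | none => best
      | some i => match best with
                  | none => some i
                  | some b => if i < b then some i else some b) none
  match best with
  | some i => pvTitle (pvPriority.getD i "")   -- priority[best]: best is always in range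
  | none => match sigs with
            | [] => "Unknown"
            | s0 :: _ => pvTitle s0

-- ===== PRECONDITION & SPEC =====
def Spec_resolve_significance_py (sigs : List String) (out : String) : Prop := out = resolve_significance_py_alt sigs
instance (sigs : List String) (out : String) : Decidable (Spec_resolve_significance_py sigs out) := by unfold Spec_resolve_significance_py; infer_instance

-- ===== CLAIM (what is proved, stated in full; the proofs are below) =====
def Claim_equal_resolve_significance_py : Prop := ∀ (sigs : List String), Dom_resolve_significance_py sigs → Spec_resolve_significance_py sigs (resolve_significance_py sigs)

-- ===== LEMMAS AND PROOFS =====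

-- min on Option Nat (none = no match yet); B's loop step is exactly this
def pvOptMin : Option Nat → Option Nat → Option Nat
  | none, v => v
  | some b, none => some b
  | some b, some i => if i < b then some i else some b

theorem pvStep_eq (best : Option Nat) (v : Option Nat) :
    (match v with
     | none => best
     | some i => match best with
                 | none => some i
                 | some b => if i < b then some i else some b) = pvOptMin best v := by
  cases best <;> cases v <;> rfl

theorem pvOptMin_zero_right (b : Option Nat) : pvOptMin b (some 0) = some 0 := by
  cases b with
  | none => rfl
  | some n => cases n <;> simp [pvOptMin]

theorem pvOptMin_zero_left (v : Option Nat) : pvOptMin (some 0) v = some 0 := by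
  cases v <;> simp [pvOptMin]

theorem pvFold_absorb (sigs : List String) (f : String → Option Nat) :
    sigs.foldl (fun b s => pvOptMin b (f s)) (some 0) = some 0 := by
  induction sigs with
  | nil => rfl
  | cons a t ih => simp [List.foldl, pvOptMin_zero_left, ih]

theorem pvFold_zero (sigs : List String) (f : String → Option Nat) (b : Option Nat)
    (h : ∃ s ∈ sigs, f s = some 0) :
    sigs.foldl (fun b s => pvOptMin b (f s)) b = some 0 := by
  induction sigs generalizing b with
  | nil => simp at h
  | cons a t ih =>
    rcases h with ⟨s, hs, hf⟩
    rcases List.mem_cons.mp hs with rfl | hmem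
    · simp [List.foldl, hf, pvOptMin_zero_right, pvFold_absorb]
    · exact ih _ ⟨s, hmem, hf⟩

theorem pvOptMin_map_succ (a v : Option Nat) :
    pvOptMin (Option.map (· + 1) a) (Option.map (· + 1) v) = Option.map (· + 1) (pvOptMin a v) := by
  cases a <;> cases v <;> simp [pvOptMin] <;> split <;> simp_all

theorem pvFold_map_succ (sigs : List String) (f : String → Option Nat) (b : Option Nat) :
    sigs.foldl (fun b s => pvOptMin b (Option.map (· + 1) (f s))) (Option.map (· + 1) b)
      = Option.map (· + 1) (sigs.foldl (fun b s => pvOptMin b (f s)) b) := by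
  induction sigs generalizing b with
  | nil => rfl
  | cons a t ih =>
    simp only [List.foldl]
    rw [pvOptMin_map_succ, ih]

theorem pvFirstMatch_succ (ps : List String) (sl : String) (k : Nat) :
    pvFirstMatch ps sl (k + 1) = Option.map (· + 1) (pvFirstMatch ps sl k) := by
  induction ps generalizing k with
  | nil => rfl
  | cons p t ih =>
    simp only [pvFirstMatch]
    split
    · rfl
    · exact ih (k + 1)

-- the core inversion lemma: B's running-minimum fold, mapped through priority indexing,
-- is A's priority-driven first-match scan
theorem pvMain (ps : List String) (sigs : List String) :
    Option.map (fun i => ps.getD i "")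
      (sigs.foldl (fun b s => pvOptMin b (pvFirstMatch ps (PySem.Str.lower s) 0)) none)
      = pvAOuter ps (sigs.map PySem.Str.lower) := by
  induction ps generalizing sigs with
  | nil =>
    have h : sigs.foldl (fun b s => pvOptMin b (pvFirstMatch [] (PySem.Str.lower s) 0)) none
        = none := by
      induction sigs with
      | nil => rfl
      | cons a t ih => simpa [List.foldl, pvFirstMatch, pvOptMin] using ih
    simp [h, pvAOuter]
  | cons p ps ih =>
    by_cases h : sigs.any (fun s => PySem.Str.isIn p (PySem.Str.lower s))
    · have hz : ∃ s ∈ sigs, pvFirstMatch (p :: ps) (PySem.Str.lower s) 0 = some 0 := by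
        rcases List.any_eq_true.mp h with ⟨s, hs, hin⟩
        refine ⟨s, hs, ?_⟩
        simp only [pvFirstMatch]
        rw [hin]
        rfl
      rw [pvFold_zero _ _ _ hz]
      have ha : (sigs.map PySem.Str.lower).any (fun s => PySem.Str.isIn p s) = true := by
        simpa [List.any_map, Function.comp] using h
      simp only [pvAOuter]
      rw [ha]
      rfl
    · have hf : ∀ s ∈ sigs, pvFirstMatch (p :: ps) (PySem.Str.lower s) 0
          = Option.map (· + 1) (pvFirstMatch ps (PySem.Str.lower s) 0) := by
        intro s hs
        have hfalse : PySem.Str.isIn p (PySem.Str.lower s) = false := by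
          cases hb : PySem.Str.isIn p (PySem.Str.lower s) with
          | false => rfl
          | true => exact absurd (List.any_eq_true.mpr ⟨s, hs, hb⟩) h
        simp only [pvFirstMatch]
        rw [hfalse, pvFirstMatch_succ]
        rfl
      have hcongr : sigs.foldl (fun b s => pvOptMin b (pvFirstMatch (p :: ps) (PySem.Str.lower s) 0)) none
          = sigs.foldl (fun b s => pvOptMin b (Option.map (· + 1) (pvFirstMatch ps (PySem.Str.lower s) 0))) none := by
        apply PySem.List.foldl_congr_mem
        intro b s hs
        rw [hf s hs]
      have hmap := pvFold_map_succ sigs (fun s => pvFirstMatch ps (PySem.Str.lower s) 0) none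
      simp only [Option.map_none] at hmap
      have ha : (sigs.map PySem.Str.lower).any (fun s => PySem.Str.isIn p s) = false := by
        simpa [List.any_map, Function.comp] using h
      rw [hcongr, hmap]
      simp only [pvAOuter]
      rw [ha]
      simp only [Bool.false_eq_true, if_false, ← ih sigs]
      cases sigs.foldl (fun b s => pvOptMin b (pvFirstMatch ps (PySem.Str.lower s) 0)) none with
      | none => rfl
      | some i => simp [List.getD]

-- ===== VERDICT (by name: the statement is the Claim_ definition above) =====
theorem resolve_significance_py_spec : Claim_equal_resolve_significance_py := by
  intro sigs _
  unfold Spec_resolve_significance_py resolve_significance_py resolve_significance_py_alt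
  simp only [pvStep_eq]
  rw [← pvMain pvPriority sigs]
  cases h : sigs.foldl (fun b s => pvOptMin b (pvFirstMatch pvPriority (PySem.Str.lower s) 0)) none with
  | none => rfl
  | some i => simp [h]
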